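-- pv_equiv track=rewrite | github.com/miliar/Code_Jam_Webscraper | solutions_python/Problem_158/770.py | calc_winner
-- ===== SOURCE A (Python) =====
-- def calc_winner(numOfBlocks, x, y):
--     area = x * y
--
--     for i in range(1, numOfBlocks+1):
--         if numOfBlocks % i == 0:
--             j = numOfBlocks/i
--             if i > x and i > y:
--                 if j > y and j > x:
--                     return "RICHARD"
--
--     if area % numOfBlocks == 0:
--         if numOfBlocks > 2:
--             if numOfBlocks >= area:
--                 return "RICHARD"
--         if numOfBlocks == 4 and (x == 2 or y == 2):
--             return "RICHARD"
--
--         return "GABRIEL"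
--     else:
--         return "RICHARD"
-- ===== SOURCE B (Python) =====
-- def calc_winner(numOfBlocks, x, y):
--     # Faster: scan divisors only up to sqrt(numOfBlocks); a divisor pair with
--     # both members > max(x, y) always has its smaller member <= sqrt(n).
--     m = x if x > y else y
--     if numOfBlocks > 0:
--         d = 1
--         while d * d <= numOfBlocks:
--             if numOfBlocks % d == 0 and d > m and numOfBlocks // d > m:
--                 return "RICHARD"
--             d += 1
--     if (x * y) % numOfBlocks != 0:
--         return "RICHARD"
--     if (numOfBlocks > 2 and numOfBlocks >= x * y) or (numOfBlocks == 4 and (x == 2 or y == 2)):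
--         return "RICHARD"
--     return "GABRIEL"
-- ===== Notes on version B (the rewrite author's own statement) =====
-- stated objective: faster
-- what changed: Instead of scanning every i in 1..n for a divisor pair exceeding max(x,y), B scans divisors only up to sqrt(n), since the smaller member of any qualifying pair is at most sqrt(n); the tail arithmetic checks are flattened into one boolean expression.
import Mathlib
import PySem

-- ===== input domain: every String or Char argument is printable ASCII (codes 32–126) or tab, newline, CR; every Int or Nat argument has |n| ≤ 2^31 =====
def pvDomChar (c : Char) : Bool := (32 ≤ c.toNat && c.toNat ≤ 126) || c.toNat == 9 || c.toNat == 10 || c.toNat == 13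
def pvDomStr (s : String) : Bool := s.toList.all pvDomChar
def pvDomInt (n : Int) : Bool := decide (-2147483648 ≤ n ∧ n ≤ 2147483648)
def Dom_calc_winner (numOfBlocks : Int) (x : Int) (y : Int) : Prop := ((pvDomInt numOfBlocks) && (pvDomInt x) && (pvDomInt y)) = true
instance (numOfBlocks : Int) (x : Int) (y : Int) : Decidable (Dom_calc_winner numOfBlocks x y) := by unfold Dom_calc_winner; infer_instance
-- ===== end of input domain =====

-- B replaces A's O(n) scan for a divisor pair exceeding max(x,y) by an O(√n) scan of
-- small divisors (the smaller member of any qualifying pair is ≤ √n); return value only.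

-- ===== PORT A =====
-- A's for-loop with early return, step for step.  j = numOfBlocks/i is Python true
-- division, but it is only used when numOfBlocks % i == 0 and |numOfBlocks| ≤ 2^31,
-- where the float value is exactly the integer quotient: ported as floordiv (exact here).
def calcLoopA (n x y : Int) : List Int → Bool
  | [] => false
  | i :: rest =>
    if PySem.Int.mod n i = 0 then
      let j := PySem.Int.floordiv n i
      if i > x ∧ i > y then
        if j > y ∧ j > x then true
        else calcLoopA n x y rest
      else calcLoopA n x y rest
    else calcLoopA n x y rest

def calc_winner (numOfBlocks : Int) (x : Int) (y : Int) : String :=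
  let area := x * y
  if calcLoopA numOfBlocks x y (PySem.List.pyRange 1 (numOfBlocks + 1) 1) then "RICHARD"
  else if PySem.Int.mod area numOfBlocks = 0 then
    if numOfBlocks > 2 ∧ numOfBlocks ≥ area then "RICHARD"
    else if numOfBlocks = 4 ∧ (x = 2 ∨ y = 2) then "RICHARD"
    else "GABRIEL"
  else "RICHARD"

-- ===== PORT B =====
-- Source B's while loop: d from 1 while d*d <= n, early return on a qualifying divisor.
-- Structural recursion on a fuel that bounds the remaining iterations (d increments
-- while d*d ≤ n forces d ≤ n, so n + 1 - d iterations always suffice).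
def bLoopFuel (n m : Int) : Nat → Int → Bool
  | 0, _ => false
  | Nat.succ fuel, d =>
    if d * d ≤ n then
      if PySem.Int.mod n d = 0 ∧ d > m ∧ PySem.Int.floordiv n d > m then true
      else bLoopFuel n m fuel (d + 1)
    else false

def bLoop (n m d : Int) : Bool := bLoopFuel n m (n + 1 - d).toNat d

def calc_winner_alt (numOfBlocks : Int) (x : Int) (y : Int) : String :=
  let m := if x > y then x else y
  if numOfBlocks > 0 ∧ bLoop numOfBlocks m 1 = true then "RICHARD"
  else if ¬ (PySem.Int.mod (x * y) numOfBlocks = 0) then "RICHARD"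
  else if (numOfBlocks > 2 ∧ numOfBlocks ≥ x * y) ∨ (numOfBlocks = 4 ∧ (x = 2 ∨ y = 2)) then "RICHARD"
  else "GABRIEL"

-- ===== PRECONDITION & SPEC =====
-- numOfBlocks = 0 is excluded: there A raises ZeroDivisionError at `area % numOfBlocks`.
def Pre_calc_winner (numOfBlocks : Int) (x : Int) (y : Int) : Prop := numOfBlocks ≠ 0
instance (numOfBlocks : Int) (x : Int) (y : Int) : Decidable (Pre_calc_winner numOfBlocks x y) := by unfold Pre_calc_winner; infer_instance
def pvWitness_calc_winner : Int × Int × Int := (6, 1, 1)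

def Spec_calc_winner (numOfBlocks : Int) (x : Int) (y : Int) (out : String) : Prop := out = calc_winner_alt numOfBlocks x y
instance (numOfBlocks : Int) (x : Int) (y : Int) (out : String) : Decidable (Spec_calc_winner numOfBlocks x y out) := by unfold Spec_calc_winner; infer_instance

-- ===== CLAIM (what is proved, stated in full; the proofs are below) =====
def Claim_equal_calc_winner : Prop := ∀ (numOfBlocks : Int) (x : Int) (y : Int), Dom_calc_winner numOfBlocks x y → Pre_calc_winner numOfBlocks x y → Spec_calc_winner numOfBlocks x y (calc_winner numOfBlocks x y)

-- ===== LEMMAS AND PROOFS =====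

-- A's loop finds an element of the list satisfying its full condition.
lemma calcLoopA_iff (n x y : Int) (L : List Int) :
    calcLoopA n x y L = true ↔
      ∃ i ∈ L, PySem.Int.mod n i = 0 ∧ i > x ∧ i > y ∧
        PySem.Int.floordiv n i > y ∧ PySem.Int.floordiv n i > x := by
  induction L with
  | nil => simp [calcLoopA]
  | cons i rest ih =>
    simp only [calcLoopA]
    split_ifs with h1 h2 h3 <;> simp_all

-- B's loop finds a divisor e ≥ d with e*e ≤ n satisfying its condition (for 1 ≤ d).
lemma bLoopFuel_iff (n m : Int) : ∀ (fuel : Nat) (d : Int), 1 ≤ d →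
    (n + 1 - d).toNat ≤ fuel →
    (bLoopFuel n m fuel d = true ↔
      ∃ e : Int, d ≤ e ∧ e * e ≤ n ∧ PySem.Int.mod n e = 0 ∧ e > m ∧
        PySem.Int.floordiv n e > m) := by
  intro fuel
  induction fuel with
  | zero =>
    intro d hd hfe
    simp only [bLoopFuel, Bool.false_eq_true, false_iff]
    rintro ⟨e, h1, h2, _⟩
    have : e ≤ e * e := by nlinarith
    omega
  | succ fuel ih =>
    intro d hd hfe
    simp only [bLoopFuel]
    by_cases hle : d * d ≤ n
    · rw [if_pos hle]
      have hdn : d ≤ n := by nlinarith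
      by_cases hcond : PySem.Int.mod n d = 0 ∧ d > m ∧ PySem.Int.floordiv n d > m
      · rw [if_pos hcond]
        constructor
        · intro _; exact ⟨d, le_refl d, hle, hcond.1, hcond.2.1, hcond.2.2⟩
        · intro _; rfl
      · rw [if_neg hcond, ih (d + 1) (by omega) (by omega)]
        constructor
        · rintro ⟨e, h1, h2⟩; exact ⟨e, by omega, h2⟩
        · rintro ⟨e, h1, h2⟩
          refine ⟨e, ?_, h2⟩
          rcases eq_or_lt_of_le h1 with rfl | h
          · exact absurd h2.2 hcond
          · omega
    · rw [if_neg hle]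
      simp only [Bool.false_eq_true, false_iff]
      rintro ⟨e, h1, h2, _⟩
      have : d * d ≤ e * e := by nlinarith
      omega

lemma bLoop_iff (n m : Int) (d : Int) (hd : 1 ≤ d) :
    bLoop n m d = true ↔
      ∃ e : Int, d ≤ e ∧ e * e ≤ n ∧ PySem.Int.mod n e = 0 ∧ e > m ∧
        PySem.Int.floordiv n e > m :=
  bLoopFuel_iff n m ((n + 1 - d).toNat) d hd (le_refl _)

-- the two existence conditions agree (n ≥ 1, m = max x y):
-- a pair (i, n/i) with both members > m exists iff one with the smaller member ≤ √n does.
lemma bridge (n x y : Int) (hn : 1 ≤ n) :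
    (∃ i ∈ PySem.List.pyRange 1 (n + 1) 1, PySem.Int.mod n i = 0 ∧ i > x ∧ i > y ∧
        PySem.Int.floordiv n i > y ∧ PySem.Int.floordiv n i > x) ↔
    (∃ e : Int, 1 ≤ e ∧ e * e ≤ n ∧ PySem.Int.mod n e = 0 ∧ e > max x y ∧
        PySem.Int.floordiv n e > max x y) := by
  constructor
  · rintro ⟨i, hmem, hmod, hix, hiy, hjy, hjx⟩
    rw [PySem.List.mem_pyRange_one] at hmem
    have hi1 : 1 ≤ i := hmem.1
    have hipos : 0 < i := by omega
    have hdvd : i ∣ n := (PySem.Int.mod_eq_zero_iff_dvd n i).mp hmod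
    set q := PySem.Int.floordiv n i with hq
    have hqe : q = n / i := by rw [hq]; exact PySem.Int.floordiv_eq_ediv_of_pos hipos
    have hmul : q * i = n := by rw [hqe]; exact Int.ediv_mul_cancel hdvd
    have hq1 : 1 ≤ q := by nlinarith
    refine ⟨min i q, by omega, ?_, ?_, by omega, ?_⟩
    · rcases le_total i q with h | h
      · simp only [min_eq_left h]; nlinarith
      · simp only [min_eq_right h]; nlinarith
    · rcases le_total i q with h | h
      · simpa [min_eq_left h] using hmod
      · rw [min_eq_right h, PySem.Int.mod_eq_zero_iff_dvd]
        exact ⟨i, by linarith [hmul.symm]⟩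
    · rcases le_total i q with h | h
      · rw [min_eq_left h, ← hq]; omega
      · rw [min_eq_right h]
        have hq0 : 0 < q := by omega
        have hfq : PySem.Int.floordiv n q = n / q := PySem.Int.floordiv_eq_ediv_of_pos hq0
        have hi : PySem.Int.floordiv n q = i := by
          rw [hfq, ← hmul]; exact Int.mul_ediv_cancel_left i (by omega)
        omega
  · rintro ⟨e, he1, hee, hmod, hem, hfm⟩
    refine ⟨e, ?_, hmod, by omega, by omega, by omega, by omega⟩
    rw [PySem.List.mem_pyRange_one]
    refine ⟨he1, by nlinarith⟩

-- the loop booleans coincide for n ≥ 1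
lemma loops_eq (n x y : Int) (hn : 1 ≤ n) :
    calcLoopA n x y (PySem.List.pyRange 1 (n + 1) 1) = bLoop n (max x y) 1 := by
  rw [Bool.eq_iff_iff, calcLoopA_iff, bLoop_iff n (max x y) 1 (le_refl 1), bridge n x y hn]

lemma ite_max (x y : Int) : (if x > y then x else y) = max x y := by split <;> omega

-- ===== VERDICT (by name: the statement is the Claim_ definition above) =====
theorem calc_winner_spec : Claim_equal_calc_winner := by
  intro n x y _ hpre
  unfold Spec_calc_winner calc_winner calc_winner_alt
  rw [ite_max]
  rcases lt_or_ge n 1 with hn | hn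
  · -- n ≤ 0 (n ≠ 0): A's range is empty, B's guard n > 0 is false; identical tails
    have hA : PySem.List.pyRange 1 (n + 1) 1 = [] := by
      rw [PySem.List.pyRange_one]
      have h0 : (n + 1 - 1).toNat = 0 := by omega
      rw [h0]; simp
    rw [hA]
    have hg : ¬ (n > 0 ∧ bLoop n (max x y) 1 = true) := by
      rintro ⟨h, _⟩; omega
    rw [if_neg hg]
    simp only [calcLoopA, Bool.false_eq_true, if_false]
    split_ifs <;> first | rfl | tauto
  · -- n ≥ 1: loop booleans equal, then identical tails
    rw [loops_eq n x y hn]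
    have hg : (n > 0 ∧ bLoop n (max x y) 1 = true) ↔ bLoop n (max x y) 1 = true := by
      constructor
      · exact fun h => h.2
      · exact fun h => ⟨by omega, h⟩
    simp only [hg]
    split_ifs <;> first | rfl | tauto
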